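-- pv_equiv track=rewrite | github.com/zparmley/DPGTheminator | scripts/generate_color_models.py | generate_class_code
-- ===== SOURCE A (Python) =====
-- def camel_to_snake(name):
--     name = list(name)
--     name[0] = name[0].lower()
--     out_name = []
--     for char in name:
--         if char.isupper():
--             out_name.append('_')
--             out_name.append(char.lower())
--         else:
--             out_name.append(char)
--     return ''.join(out_name)
--
-- def generate_class_code(name: str, member_constants: list[str]):
--     underscore_location = member_constants[0].index('_')
--     parts: list[str] = [
--         f'class {name}(msgspec.Struct):',
--         f"    '''{name} colors'''",
--     ]
--
--     for member_constant in member_constants: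
--         member_name = camel_to_snake(member_constant[underscore_location+1:])
--         parts.append(f'    {member_name}: Color')
--
--     return '\n'.join(parts)
-- ===== SOURCE B (Python) =====
-- def camel_to_snake(name):
--     # chunk-wise: repeatedly jump to the next uppercase letter and splice slices,
--     # instead of mapping character by character
--     s = name[0].lower() + name[1:]
--     chunks = []
--     while True:
--         j = next((i for i, ch in enumerate(s) if ch.isupper()), -1)
--         if j < 0:
--             chunks.append(s)
--             return ''.join(chunks)
--         chunks.append(s[:j])
--         chunks.append('_' + s[j].lower())
--         s = s[j + 1:]
--
-- def generate_class_code(name: str, member_constants: list[str]):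
--     underscore_location = member_constants[0].index('_')
--     members = (
--         f'    {camel_to_snake(m[underscore_location + 1:])}: Color'
--         for m in member_constants
--     )
--     return '\n'.join([
--         f'class {name}(msgspec.Struct):',
--         f"    '''{name} colors'''",
--         *members,
--     ])
-- ===== Notes on version B (the rewrite author's own statement) =====
-- stated objective: alternative
-- what changed: camel_to_snake is rewritten from A's per-character accumulator loop (append one or two chars per input char) to a chunk-wise scan: a loop that repeatedly finds the index of the next uppercase letter, emits the verbatim slice before it plus '_'+that letter lowered, and continues on the tail slice; generate_class_code splices the member lines into a single join instead of appending to a parts list.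
import Mathlib
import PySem

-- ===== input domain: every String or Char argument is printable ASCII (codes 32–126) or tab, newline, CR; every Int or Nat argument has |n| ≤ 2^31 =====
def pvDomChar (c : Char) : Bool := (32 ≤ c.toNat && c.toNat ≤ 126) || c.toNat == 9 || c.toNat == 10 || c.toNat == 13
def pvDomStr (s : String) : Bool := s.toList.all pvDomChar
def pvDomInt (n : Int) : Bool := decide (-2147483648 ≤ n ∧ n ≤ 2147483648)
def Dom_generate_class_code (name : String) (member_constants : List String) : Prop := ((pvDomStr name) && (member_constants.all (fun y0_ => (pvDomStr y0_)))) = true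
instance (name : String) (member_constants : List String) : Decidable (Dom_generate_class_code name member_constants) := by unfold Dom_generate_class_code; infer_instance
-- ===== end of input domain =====

-- ===== PORT A =====
-- B replaces camel_to_snake's per-character accumulator loop by a chunk-wise scan that
-- repeatedly jumps to the next uppercase letter and splices slices (objective: alternative).
-- helper of A: camel_to_snake — list(name), name[0] = name[0].lower(), then append-loop, ''.join
def camelA (cs : List Char) : List Char :=
  match cs with
  | [] => []  -- unreachable under Pre_: Python raises IndexError on name[0] for empty input
  | c :: rest =>
    (PySem.Chars.lowerChar c :: rest).foldl
      (fun out ch =>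
        if PySem.Chars.isupper ch then out ++ ['_', PySem.Chars.lowerChar ch]
        else out ++ [ch]) []

def camel_to_snakeA (s : String) : String := String.ofList (camelA s.toList)

def generate_class_code (name : String) (member_constants : List String) : String :=
  let underscore_location : Nat :=
    (PySem.List.index? (member_constants.headD "").toList '_').getD 0  -- .index('_'); some under Pre_
  let parts : List String :=
    ["class " ++ name ++ "(msgspec.Struct):",
     "    '''" ++ name ++ " colors'''"]
  let parts := member_constants.foldl
    (fun ps m =>
      ps ++ ["    " ++ camel_to_snakeA (String.ofList (PySem.List.slice m.toList (some ((underscore_location : Int) + 1)) none)) ++ ": Color"])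
    parts
  PySem.Str.join "\n" parts

-- ===== PORT B =====
-- helper of B: the while loop — find the next uppercase index j, emit s[:j] and '_'+s[j].lower(),
-- continue on s[j+1:]; the loop becomes recursion on the remaining chunk
def splitCamelB (t : List Char) : List Char :=
  match h : t.findIdx? PySem.Chars.isupper with
  | none => t
  | some j =>
      t.take j ++ '_' :: PySem.Chars.lowerChar (t.getD j ' ') :: splitCamelB (t.drop (j + 1))
termination_by t.length
decreasing_by
  have hj := (List.findIdx?_eq_some_iff_getElem.mp h).fst
  simp [List.length_drop]; omega

-- s = name[0].lower() + name[1:], then the chunk loop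
def camelB (cs : List Char) : List Char :=
  match cs with
  | [] => []  -- unreachable under Pre_: Python raises IndexError on name[0] for empty input
  | c :: rest => splitCamelB (PySem.Chars.lowerChar c :: rest)

def camel_to_snakeB (s : String) : String := String.ofList (camelB s.toList)

def generate_class_code_alt (name : String) (member_constants : List String) : String :=
  let underscore_location : Nat :=
    (PySem.List.index? (member_constants.headD "").toList '_').getD 0
  PySem.Str.join "\n"
    (("class " ++ name ++ "(msgspec.Struct):") ::
     ("    '''" ++ name ++ " colors'''") ::
     member_constants.map (fun m =>
       "    " ++ camel_to_snakeB (String.ofList (m.toList.drop (underscore_location + 1))) ++ ": Color"))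

-- ===== PRECONDITION & SPEC =====
-- Pre_ excludes exactly the inputs on which Python A raises: an empty member list or a first
-- member without '_' (IndexError/ValueError from .index), and any member so short that the
-- slice after the underscore position is empty (camel_to_snake then raises IndexError on name[0]).
def Pre_generate_class_code (name : String) (member_constants : List String) : Prop :=
  member_constants ≠ [] ∧
  '_' ∈ (member_constants.headD "").toList ∧
  ∀ m ∈ member_constants,
    ((PySem.List.index? (member_constants.headD "").toList '_').getD 0) + 2 ≤ m.toList.length

instance (name : String) (member_constants : List String) : Decidable (Pre_generate_class_code name member_constants) := by
  unfold Pre_generate_class_code; infer_instance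

def pvWitness_generate_class_code : String × List String :=
  ("Theme", ["COLOR_BrightRed", "COLOR_DeepBlue"])

def Spec_generate_class_code (name : String) (member_constants : List String) (out : String) : Prop := out = generate_class_code_alt name member_constants
instance (name : String) (member_constants : List String) (out : String) : Decidable (Spec_generate_class_code name member_constants out) := by unfold Spec_generate_class_code; infer_instance

-- ===== CLAIM (what is proved, stated in full; the proofs are below) =====
def Claim_equal_generate_class_code : Prop := ∀ (name : String) (member_constants : List String), Dom_generate_class_code name member_constants → Pre_generate_class_code name member_constants → Spec_generate_class_code name member_constants (generate_class_code name member_constants)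

-- ===== LEMMAS AND PROOFS =====

-- the per-character emission both programs realise, as a flatMap body
def camelStep (ch : Char) : List Char :=
  if PySem.Chars.isupper ch then ['_', PySem.Chars.lowerChar ch] else [ch]

-- chunks with no uppercase letter are emitted verbatim
theorem flatMap_camelStep_of_none (t : List Char)
    (h : ∀ x ∈ t, PySem.Chars.isupper x = false) : t.flatMap camelStep = t := by
  induction t with
  | nil => rfl
  | cons c rest ih =>
    have hc := h c List.mem_cons_self
    simp [List.flatMap_cons, camelStep, hc, ih (fun x hx => h x (List.mem_cons_of_mem _ hx))]

-- B's chunk-wise scan equals the per-character flatMap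
theorem splitCamelB_eq_flatMap (t : List Char) : t.flatMap camelStep = splitCamelB t := by
  rw [splitCamelB]
  split
  · rename_i h
    exact flatMap_camelStep_of_none t (List.findIdx?_eq_none_iff.mp h)
  · rename_i j h
    obtain ⟨hj, hup, hbefore⟩ := List.findIdx?_eq_some_iff_getElem.mp h
    have hsplit : t = t.take j ++ t[j] :: t.drop (j + 1) := by
      conv_lhs => rw [← List.take_append_drop j t, List.drop_eq_getElem_cons hj]
    have hgetD : t.getD j ' ' = t[j] := List.getD_eq_getElem t ' ' hj
    conv_lhs => rw [hsplit]
    rw [List.flatMap_append, List.flatMap_cons,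
      flatMap_camelStep_of_none (t.take j) (by
        intro x hx
        obtain ⟨i, hi, rfl⟩ := List.mem_take_iff_getElem.mp hx
        have hilt : i < j := lt_of_lt_of_le hi (by omega)
        simpa using hbefore i hilt),
      splitCamelB_eq_flatMap (t.drop (j + 1))]
    simp [camelStep, hup, List.getElem?_eq_getElem hj]
termination_by t.length
decreasing_by
  simp [List.length_drop]; omega

-- A's accumulator loop and B's chunk scan produce the same character list
theorem camelA_eq_camelB (cs : List Char) : camelA cs = camelB cs := by
  cases cs with
  | nil => rfl
  | cons c rest =>
    simp only [camelA, camelB]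
    have hfun :
        (fun (out : List Char) (ch : Char) =>
          if PySem.Chars.isupper ch then out ++ ['_', PySem.Chars.lowerChar ch] else out ++ [ch])
        = (fun out ch => out ++ camelStep ch) := by
      funext o ch; simp only [camelStep]; split <;> rfl
    rw [hfun, PySem.List.foldl_append_eq_flatMap, splitCamelB_eq_flatMap]
    simp

theorem camel_eq (s : String) : camel_to_snakeA s = camel_to_snakeB s := by
  unfold camel_to_snakeA camel_to_snakeB
  rw [camelA_eq_camelB]

-- ===== VERDICT (by name: the statement is the Claim_ definition above) =====
theorem generate_class_code_spec : Claim_equal_generate_class_code := by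
  unfold Claim_equal_generate_class_code
  intro name member_constants _ _
  simp only [Spec_generate_class_code, generate_class_code, generate_class_code_alt]
  rw [PySem.List.foldl_append_singleton_eq_map]
  apply congrArg
  simp only [List.cons_append, List.nil_append]
  refine congrArg _ (congrArg _ ?_)
  apply List.map_congr_left
  intro m _
  rw [camel_eq]
  have hc : ((((PySem.List.index? (member_constants.headD "").toList '_').getD 0 : Nat) : Int) + 1)
      = (((PySem.List.index? (member_constants.headD "").toList '_').getD 0 + 1 : Nat) : Int) := by
    push_cast; ring
  rw [hc, PySem.List.slice_from_natCast]
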